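-- pv_equiv track=rewrite | github.com/dchege711/programming_challenges | project-euler/023-non-abundant-sums/non_abundant_sums_deluxe.py | pairwise_sums
-- ===== SOURCE A (Python) =====
-- def pairwise_sums(nums, K):
--     """
--     Given a sequence of numbers like [1, 4, 6], return unique sums like
--     [2, 5, 7, 8, 10, 12]. Sums that are greater than N are excluded from the
--     result.
--     """
--     # Ensure that the iterable is sorted. This also avoids a bug if `nums` is
--     # a generator, as iterating over it more than once is incorrect.
--     nums = sorted(nums)
--
--     sums = set([])
--     for r in nums:
--         for c in nums:
--             # Only consider the lower triangle of the grid. Fine to compare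
--             # values and not indices because `nums` is sorted and used in both
--             # loops.
--             if c > r: break
--
--             s = r + c
--
--             # Any other sum on this row will be greater than K
--             if s > K: break
--
--             sums.add(s)
--
--     return sums
-- ===== SOURCE B (Python) =====
-- def pairwise_sums(nums, K):
--     """Unique sums u+v with u,v in nums (u <= v), bounded by K."""
--     vals = sorted(set(nums))
--     return {v + u for v in vals for u in vals if u <= v and v + u <= K}
-- ===== Notes on version B (the rewrite author's own statement) =====
-- stated objective: alternative
-- what changed: B deduplicates the input once (sorted(set(nums))) and builds the result as a single filtered set comprehension over the distinct values, instead of A's nested stateful loops with early breaks over the full sorted list.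
import Mathlib
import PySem

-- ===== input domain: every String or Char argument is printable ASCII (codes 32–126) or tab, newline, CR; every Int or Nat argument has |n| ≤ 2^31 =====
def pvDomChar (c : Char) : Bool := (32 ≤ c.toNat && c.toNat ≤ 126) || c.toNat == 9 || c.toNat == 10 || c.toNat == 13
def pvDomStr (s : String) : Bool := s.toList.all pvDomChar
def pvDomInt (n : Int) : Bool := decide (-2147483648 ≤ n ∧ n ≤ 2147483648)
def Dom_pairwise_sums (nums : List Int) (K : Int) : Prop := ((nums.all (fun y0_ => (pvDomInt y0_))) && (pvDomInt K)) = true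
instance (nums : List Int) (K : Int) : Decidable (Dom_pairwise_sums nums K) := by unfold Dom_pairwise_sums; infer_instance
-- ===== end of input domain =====

-- B deduplicates the input once and builds the sums as a filtered comprehension over the
-- sorted distinct values, instead of A's nested stateful loops with breaks over the full list.

-- ===== PORT A =====
-- inner 'for c in nums' loop: break on c > r, break on r + c > K, else add r + c
def pvInnerA (K r : Int) : List Int → PySem.Set Int → PySem.Set Int
  | [], s => s
  | c :: cs, s =>
    if r < c then s
    else if K < r + c then s
    else pvInnerA K r cs (PySem.Set.add s (r + c))

def pairwise_sums (nums : List Int) (K : Int) : List Int :=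
  let ns := PySem.List.sorted nums (fun x => x)
  ns.foldl (fun s r => pvInnerA K r ns s) PySem.Set.empty

-- ===== PORT B =====
def pairwise_sums_alt (nums : List Int) (K : Int) : List Int :=
  let vals := PySem.List.sorted (PySem.Set.ofList nums) (fun x => x)
  PySem.Set.ofList (vals.flatMap (fun v =>
    (vals.filter (fun u => decide (u ≤ v) && decide (v + u ≤ K))).map (fun u => v + u)))

-- ===== PRECONDITION & SPEC =====
def Spec_pairwise_sums (nums : List Int) (K : Int) (out : List Int) : Prop := out = pairwise_sums_alt nums K
instance (nums : List Int) (K : Int) (out : List Int) : Decidable (Spec_pairwise_sums nums K out) := by unfold Spec_pairwise_sums; infer_instance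

-- ===== CLAIM (what is proved, stated in full; the proofs are below) =====
def Claim_equal_pairwise_sums : Prop := ∀ (nums : List Int) (K : Int), Dom_pairwise_sums nums K → Spec_pairwise_sums nums K (pairwise_sums nums K)

-- ===== LEMMAS AND PROOFS =====

-- building a set from a snoc
theorem pv_ofList_snoc (l : List Int) (x : Int) :
    (PySem.Set.ofList (l ++ [x]) : PySem.Set Int) = PySem.Set.add (PySem.Set.ofList l) x := by
  rw [PySem.Set.ofList_eq_foldl, List.foldl_append, ← PySem.Set.ofList_eq_foldl,
    List.foldl_cons, List.foldl_nil]

-- membership in a Set.add fold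
theorem pv_mem_foldl_add (l : List Int) (s : PySem.Set Int) (y : Int) :
    y ∈ l.foldl PySem.Set.add s ↔ y ∈ s ∨ y ∈ l := by
  induction l generalizing s with
  | nil => simp
  | cons x xs ih =>
    simp [List.foldl_cons, ih, PySem.Set.mem_add]
    tauto

-- folding elements already present is a no-op
theorem pv_foldl_add_absorb (l : List Int) (s : PySem.Set Int) (h : ∀ y ∈ l, y ∈ s) :
    l.foldl PySem.Set.add s = s := by
  induction l with
  | nil => rfl
  | cons x xs ih =>
    have hx : x ∈ s := h x (by simp)
    simp [List.foldl_cons, PySem.Set.add_of_mem hx]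
    exact ih (fun y hy => h y (by simp [hy]))

-- folding a list equals folding its dedup (first occurrences)
theorem pv_foldl_add_ofList (l : List Int) (s : PySem.Set Int) :
    l.foldl PySem.Set.add s = (PySem.Set.ofList l : List Int).foldl PySem.Set.add s := by
  induction l using List.reverseRecOn with
  | nil => rfl
  | append_singleton l x ih =>
    rw [List.foldl_append, List.foldl_cons, List.foldl_nil, pv_ofList_snoc, ih]
    by_cases hx : x ∈ (PySem.Set.ofList l : List Int)
    · rw [PySem.Set.add_of_mem hx,
        PySem.Set.add_of_mem ((pv_mem_foldl_add _ s x).2 (Or.inr hx))]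
    · rw [PySem.Set.add_of_not_mem hx, List.foldl_append, List.foldl_cons, List.foldl_nil]

-- duplicated source blocks in a flatMap are absorbed by the fold
theorem pv_foldl_add_flatMap_ofList (g : Int → List Int) (l : List Int) (s : PySem.Set Int) :
    (l.flatMap g).foldl PySem.Set.add s
      = ((PySem.Set.ofList l : List Int).flatMap g).foldl PySem.Set.add s := by
  induction l using List.reverseRecOn with
  | nil => rfl
  | append_singleton l x ih =>
    rw [List.flatMap_append, List.foldl_append, ih, pv_ofList_snoc]
    simp only [List.flatMap_cons, List.flatMap_nil, List.append_nil]
    by_cases hx : x ∈ (PySem.Set.ofList l : List Int)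
    · rw [PySem.Set.add_of_mem hx]
      apply pv_foldl_add_absorb
      intro y hy
      exact (pv_mem_foldl_add _ s y).2 (Or.inr (List.mem_flatMap.2 ⟨x, hx, hy⟩))
    · rw [PySem.Set.add_of_not_mem hx, List.flatMap_append, List.foldl_append]
      simp only [List.flatMap_cons, List.flatMap_nil, List.append_nil]

-- pointwise block congruence for the fold of a flatMap
theorem pv_foldl_add_flatMap_congr (g1 g2 : Int → List Int) (l : List Int)
    (h : ∀ r ∈ l, ∀ s : PySem.Set Int, (g1 r).foldl PySem.Set.add s = (g2 r).foldl PySem.Set.add s)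
    (s : PySem.Set Int) :
    (l.flatMap g1).foldl PySem.Set.add s = (l.flatMap g2).foldl PySem.Set.add s := by
  induction l generalizing s with
  | nil => rfl
  | cons x xs ih =>
    rw [List.flatMap_cons, List.flatMap_cons, List.foldl_append, List.foldl_append,
      h x (by simp)]
    exact ih (fun r hr => h r (by simp [hr])) _

-- the nested loop shape: outer fold of inner folds is the fold of a flatMap
theorem pv_foldl_nested (g : Int → List Int) (l : List Int) (s : PySem.Set Int) :
    l.foldl (fun s r => (g r).foldl PySem.Set.add s) s = (l.flatMap g).foldl PySem.Set.add s := by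
  induction l generalizing s with
  | nil => rfl
  | cons x xs ih => rw [List.foldl_cons, List.flatMap_cons, List.foldl_append, ih]

-- A's inner loop adds the takeWhile prefix of admissible c's
theorem pv_innerA_eq (K r : Int) (cs : List Int) (s : PySem.Set Int) :
    pvInnerA K r cs s
      = ((cs.takeWhile (fun c => decide (c ≤ r) && decide (r + c ≤ K))).map
          (fun c => r + c)).foldl PySem.Set.add s := by
  induction cs generalizing s with
  | nil => rfl
  | cons c cs ih =>
    by_cases h1 : r < c
    · rw [pvInnerA]
      simp [h1, not_le.2 h1]
    · by_cases h2 : K < r + c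
      · rw [pvInnerA]
        simp [h1, h2, not_le.2 h2, not_lt.1 h1]
      · rw [pvInnerA]
        simp only [if_neg h1, if_neg h2, List.takeWhile_cons, decide_eq_true (not_lt.1 h1),
          decide_eq_true (not_lt.1 h2), Bool.and_self]
        exact ih _

-- on a ≤-sorted list, a downward-closed takeWhile is the filter
theorem pv_takeWhile_eq_filter (p : Int → Bool)
    (hp : ∀ a b : Int, a ≤ b → p b = true → p a = true) :
    ∀ l : List Int, l.Pairwise (· ≤ ·) → l.takeWhile p = l.filter p := by
  intro l hl
  induction l with
  | nil => rfl
  | cons c cs ih =>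
    rcases List.pairwise_cons.1 hl with ⟨hc, hcs⟩
    by_cases h : p c = true
    · rw [List.takeWhile_cons_of_pos h, List.filter_cons_of_pos h, ih hcs]
    · rw [List.takeWhile_cons_of_neg (by simp [h]), List.filter_cons_of_neg (by simp [h])]
      symm
      rw [List.filter_eq_nil_iff]
      intro b hb hpb
      exact h (hp c b (hc b hb) hpb)

-- PySem.Set.ofList is a sublist of its source
theorem pv_ofList_sublist (l : List Int) : (PySem.Set.ofList l : List Int).Sublist l := by
  induction l using List.reverseRecOn with
  | nil => simp [PySem.Set.ofList_eq_foldl]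
  | append_singleton l x ih =>
    rw [pv_ofList_snoc]
    by_cases hx : x ∈ (PySem.Set.ofList l : List Int)
    · rw [PySem.Set.add_of_mem hx]
      exact ih.trans (List.sublist_append_left l [x])
    · rw [PySem.Set.add_of_not_mem hx]
      exact ih.append (List.Sublist.refl [x])

-- ofList commutes with an injective map
theorem pv_ofList_map (f : Int → Int) (hf : Function.Injective f) (l : List Int) :
    (PySem.Set.ofList (l.map f) : List Int) = (PySem.Set.ofList l : List Int).map f := by
  induction l using List.reverseRecOn with
  | nil => rfl
  | append_singleton l x ih =>
    rw [List.map_append, List.map_singleton, pv_ofList_snoc, pv_ofList_snoc, ih]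
    by_cases hx : x ∈ (PySem.Set.ofList l : List Int)
    · rw [PySem.Set.add_of_mem hx, PySem.Set.add_of_mem (List.mem_map_of_mem hx)]
    · have h1 : f x ∉ (PySem.Set.ofList l : List Int).map f := by
        intro h
        rcases List.mem_map.1 h with ⟨y, hy, hxy⟩
        exact hx (hf hxy ▸ hy)
      rw [PySem.Set.add_of_not_mem hx, PySem.Set.add_of_not_mem h1, List.map_append,
        List.map_singleton]

-- ofList commutes with filter
theorem pv_ofList_filter (p : Int → Bool) (l : List Int) :
    (PySem.Set.ofList (l.filter p) : List Int) = (PySem.Set.ofList l : List Int).filter p := by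
  induction l using List.reverseRecOn with
  | nil => rfl
  | append_singleton l x ih =>
    rw [pv_ofList_snoc, List.filter_append]
    by_cases hx : x ∈ (PySem.Set.ofList l : List Int)
    · rw [PySem.Set.add_of_mem hx]
      by_cases hp : p x = true
      · have h1 : List.filter p [x] = [x] := by simp [List.filter, hp]
        rw [h1, pv_ofList_snoc, ih,
          PySem.Set.add_of_mem (List.mem_filter.2 ⟨hx, hp⟩)]
      · have h1 : List.filter p [x] = [] := by simp [List.filter, hp]
        rw [h1, List.append_nil, ih]
    · rw [PySem.Set.add_of_not_mem hx, List.filter_append]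
      by_cases hp : p x = true
      · have h1 : List.filter p [x] = [x] := by simp [List.filter, hp]
        rw [h1, pv_ofList_snoc, ih,
          PySem.Set.add_of_not_mem (fun h => hx (List.mem_filter.1 h).1)]
      · have h1 : List.filter p [x] = [] := by simp [List.filter, hp]
        rw [h1, List.append_nil, List.append_nil, ih]

-- sorted(set(nums)) is the ordered dedup of sorted(nums)
theorem pv_sorted_ofList (nums : List Int) :
    PySem.List.sorted (PySem.Set.ofList nums : List Int) (fun x => x)
      = (PySem.Set.ofList (PySem.List.sorted nums (fun x => x)) : List Int) := by
  apply PySem.List.sorted_eq_of_perm_of_pairwise_lt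
  · rw [List.perm_ext_iff_of_nodup (PySem.Set.nodup_ofList _) (PySem.Set.nodup_ofList _)]
    intro a
    rw [PySem.Set.mem_ofList, PySem.Set.mem_ofList, PySem.List.mem_sorted]
  · have hsub := pv_ofList_sublist (PySem.List.sorted nums (fun x => x))
    have hle : (PySem.Set.ofList (PySem.List.sorted nums (fun x => x)) : List Int).Pairwise (· ≤ ·) :=
      (PySem.List.sorted_pairwise nums (fun x => x)).sublist hsub
    have hne : (PySem.Set.ofList (PySem.List.sorted nums (fun x => x)) : List Int).Pairwise (· ≠ ·) :=
      PySem.Set.nodup_ofList _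
    exact (hle.and hne).imp (fun h => lt_of_le_of_ne h.1 h.2)

-- ===== VERDICT (by name: the statement is the Claim_ definition above) =====
theorem pairwise_sums_spec : Claim_equal_pairwise_sums := by
  intro nums K _
  unfold Spec_pairwise_sums pairwise_sums pairwise_sums_alt
  simp only []
  set S := PySem.List.sorted nums (fun x => x) with hS
  have hV : PySem.List.sorted (PySem.Set.ofList nums : List Int) (fun x => x)
      = (PySem.Set.ofList S : List Int) := pv_sorted_ofList nums
  rw [hV]
  set V := (PySem.Set.ofList S : List Int) with hVdef
  have hsortedS : S.Pairwise (· ≤ ·) := PySem.List.sorted_pairwise nums (fun x => x)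
  -- step 1: the inner loop adds exactly the filtered block of its row
  have step1 : ∀ r, (fun s => pvInnerA K r S s)
      = fun s => ((S.filter (fun c => decide (c ≤ r) && decide (r + c ≤ K))).map
          (fun c => r + c)).foldl PySem.Set.add s := by
    intro r
    funext s
    rw [pv_innerA_eq, pv_takeWhile_eq_filter _ ?_ S hsortedS]
    intro a b hab hpb
    simp only [Bool.and_eq_true, decide_eq_true_eq] at hpb ⊢
    omega
  have houter : S.foldl (fun s r => pvInnerA K r S s) PySem.Set.empty
      = (S.flatMap (fun r => (S.filter (fun c => decide (c ≤ r) && decide (r + c ≤ K))).map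
          (fun c => r + c))).foldl PySem.Set.add PySem.Set.empty := by
    rw [← pv_foldl_nested]
    congr 1
    funext s r
    exact congrFun (step1 r) s
  rw [houter]
  -- step 2: per row, S's filtered block folds like V's filtered block
  have hblock : ∀ r ∈ S, ∀ s : PySem.Set Int,
      ((S.filter (fun c => decide (c ≤ r) && decide (r + c ≤ K))).map (fun c => r + c)).foldl PySem.Set.add s
        = ((V.filter (fun u => decide (u ≤ r) && decide (r + u ≤ K))).map (fun u => r + u)).foldl PySem.Set.add s := by
    intro r _ s
    calc ((S.filter (fun c => decide (c ≤ r) && decide (r + c ≤ K))).map (fun c => r + c)).foldl PySem.Set.add s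
        = (PySem.Set.ofList ((S.filter (fun c => decide (c ≤ r) && decide (r + c ≤ K))).map (fun c => r + c)) : List Int).foldl PySem.Set.add s :=
          pv_foldl_add_ofList _ s
      _ = ((V.filter (fun u => decide (u ≤ r) && decide (r + u ≤ K))).map (fun u => r + u)).foldl PySem.Set.add s := by
          rw [pv_ofList_map _ (add_right_injective r), pv_ofList_filter]
  -- step 3: replace S by its dedup V as the row source, and read off B
  rw [pv_foldl_add_flatMap_congr _ _ S hblock PySem.Set.empty,
    pv_foldl_add_flatMap_ofList]
  rfl
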